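-- pv_equiv track=rewrite | github.com/mdhikaf22/Tugas-Besar-Teori-Bahasa-dan-Automata | TubesTba.py | is_object
-- ===== SOURCE A (Python) =====
-- def is_object(word):
--     curr_state = 0
--     for letter in word:
--         if curr_state == 0:
--             if letter == 'k':
--                 curr_state = 1
--             elif letter == 'a':
--                 curr_state = 3
--             elif letter == 'f':
--                 curr_state = 5
--             elif letter == 'n':
--                 curr_state = 8
--             elif letter == 'b':
--                 curr_state = 11
--             else:
--                 curr_state = -1
--         elif curr_state == 1:
--             if letter == 'u':
--                 curr_state = 2
--             else:
--                 curr_state = -1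
--         elif curr_state == 2:
--             if letter == 'e':
--                 curr_state = 14
--                 return True
--             else:
--                 curr_state = -1
--         elif curr_state == 3:
--             if letter == 'i':
--                 curr_state = 4
--             else:
--                 curr_state = -1
--         elif curr_state == 4:
--             if letter == 'r':
--                 curr_state = 14
--                 return True
--             else:
--                 curr_state = -1
--         elif curr_state == 5:
--             if letter == 'i':
--                 curr_state = 6
--             else:
--                 curr_state = -1
--         elif curr_state == 6:
--             if letter == 'l':
--                 curr_state = 7
--             else:
--                 curr_state = -1
--         elif curr_state == 7:
--             if letter == 'm':
--                 curr_state = 14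
--                 return True
--             else:
--                 curr_state = -1
--         elif curr_state == 8:
--             if letter == 'a':
--                 curr_state = 9
--             else:
--                 curr_state = -1
--         elif curr_state == 9:
--             if letter == 's':
--                 curr_state = 10
--             else:
--                 curr_state = -1
--         elif curr_state == 10:
--             if letter == 'i':
--                 curr_state = 14
--                 return True
--             else:
--                 curr_state = -1
--         elif curr_state == 11:
--             if letter == 'u':
--                 curr_state = 12
--             else:
--                 curr_state = -1
--         elif curr_state == 12:
--             if letter == 'k':
--                 curr_state = 13
--             else:
--                 curr_state = -1
--         elif curr_state == 13:
--             if letter == 'u':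
--                 curr_state = 14
--                 return True
--             else:
--                 curr_state = -1
--         elif curr_state == 14:
--             return True
--         else:
--             curr_state = -1
--     return curr_state in [14]
-- ===== SOURCE B (Python) =====
-- def is_object(word):
--     return word.startswith(("kue", "air", "film", "nasi", "buku"))
-- ===== Notes on version B (the rewrite author's own statement) =====
-- stated objective: idiomatic
-- what changed: Replaces the hand-coded 15-state DFA loop over every character by a single prefix test against the five accepting prefixes via str.startswith.
import Mathlib
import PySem

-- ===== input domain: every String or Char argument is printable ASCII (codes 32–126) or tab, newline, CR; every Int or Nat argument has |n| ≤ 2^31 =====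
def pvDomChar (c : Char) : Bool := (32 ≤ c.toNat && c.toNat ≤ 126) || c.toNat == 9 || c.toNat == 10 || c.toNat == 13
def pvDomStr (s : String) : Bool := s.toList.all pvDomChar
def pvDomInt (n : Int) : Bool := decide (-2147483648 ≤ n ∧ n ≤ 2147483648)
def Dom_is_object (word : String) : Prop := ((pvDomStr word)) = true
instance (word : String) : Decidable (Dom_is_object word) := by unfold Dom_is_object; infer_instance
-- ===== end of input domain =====

-- B replaces A's hand-coded DFA loop with a direct startswith test against the five accepting prefixes (idiomatic).

-- ===== PORT A =====
-- literal transliteration of A's state-machine loop; early `return True` becomes returning `true`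
def isObjLoop : Int → List Char → Bool
  | s, [] => decide (s = 14)          -- `return curr_state in [14]`
  | s, c :: rest =>
    if s = 0 then
      if c = 'k' then isObjLoop 1 rest
      else if c = 'a' then isObjLoop 3 rest
      else if c = 'f' then isObjLoop 5 rest
      else if c = 'n' then isObjLoop 8 rest
      else if c = 'b' then isObjLoop 11 rest
      else isObjLoop (-1) rest
    else if s = 1 then
      if c = 'u' then isObjLoop 2 rest else isObjLoop (-1) rest
    else if s = 2 then
      if c = 'e' then true else isObjLoop (-1) rest
    else if s = 3 then
      if c = 'i' then isObjLoop 4 rest else isObjLoop (-1) rest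
    else if s = 4 then
      if c = 'r' then true else isObjLoop (-1) rest
    else if s = 5 then
      if c = 'i' then isObjLoop 6 rest else isObjLoop (-1) rest
    else if s = 6 then
      if c = 'l' then isObjLoop 7 rest else isObjLoop (-1) rest
    else if s = 7 then
      if c = 'm' then true else isObjLoop (-1) rest
    else if s = 8 then
      if c = 'a' then isObjLoop 9 rest else isObjLoop (-1) rest
    else if s = 9 then
      if c = 's' then isObjLoop 10 rest else isObjLoop (-1) rest
    else if s = 10 then
      if c = 'i' then true else isObjLoop (-1) rest
    else if s = 11 then
      if c = 'u' then isObjLoop 12 rest else isObjLoop (-1) rest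
    else if s = 12 then
      if c = 'k' then isObjLoop 13 rest else isObjLoop (-1) rest
    else if s = 13 then
      if c = 'u' then true else isObjLoop (-1) rest
    else if s = 14 then true
    else isObjLoop (-1) rest

def is_object (word : String) : Bool := isObjLoop 0 word.toList

-- ===== PORT B =====
-- `word.startswith((p1, …, p5))` = any of the five single-prefix tests
def is_object_alt (word : String) : Bool :=
  ["kue", "air", "film", "nasi", "buku"].any (fun p => PySem.Str.startswith word p)

-- ===== PRECONDITION & SPEC =====
def Spec_is_object (word : String) (out : Bool) : Prop := out = is_object_alt word
instance (word : String) (out : Bool) : Decidable (Spec_is_object word out) := by unfold Spec_is_object; infer_instance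

-- ===== CLAIM (what is proved, stated in full; the proofs are below) =====
def Claim_equal_is_object : Prop := ∀ (word : String), Dom_is_object word → Spec_is_object word (is_object word)

-- ===== LEMMAS AND PROOFS =====

theorem isObjLoop_dead (l : List Char) : isObjLoop (-1) l = false := by
  induction l with
  | nil => simp [isObjLoop]
  | cons c r ih => simp [isObjLoop, ih]

theorem isObjLoop_2 (l : List Char) : isObjLoop 2 l = decide (['e'] <+: l) := by
  cases l with
  | nil => simp [isObjLoop]
  | cons c r =>
    by_cases h : c = 'e' <;>
      simp [isObjLoop, h, isObjLoop_dead, List.cons_prefix_cons, eq_comm]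

theorem isObjLoop_4 (l : List Char) : isObjLoop 4 l = decide (['r'] <+: l) := by
  cases l with
  | nil => simp [isObjLoop]
  | cons c r =>
    by_cases h : c = 'r' <;>
      simp [isObjLoop, h, isObjLoop_dead, List.cons_prefix_cons, eq_comm]

theorem isObjLoop_7 (l : List Char) : isObjLoop 7 l = decide (['m'] <+: l) := by
  cases l with
  | nil => simp [isObjLoop]
  | cons c r =>
    by_cases h : c = 'm' <;>
      simp [isObjLoop, h, isObjLoop_dead, List.cons_prefix_cons, eq_comm]

theorem isObjLoop_10 (l : List Char) : isObjLoop 10 l = decide (['i'] <+: l) := by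
  cases l with
  | nil => simp [isObjLoop]
  | cons c r =>
    by_cases h : c = 'i' <;>
      simp [isObjLoop, h, isObjLoop_dead, List.cons_prefix_cons, eq_comm]

theorem isObjLoop_13 (l : List Char) : isObjLoop 13 l = decide (['u'] <+: l) := by
  cases l with
  | nil => simp [isObjLoop]
  | cons c r =>
    by_cases h : c = 'u' <;>
      simp [isObjLoop, h, isObjLoop_dead, List.cons_prefix_cons, eq_comm]

theorem isObjLoop_12 (l : List Char) : isObjLoop 12 l = decide (['k','u'] <+: l) := by
  cases l with
  | nil => simp [isObjLoop]
  | cons c r =>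
    by_cases h : c = 'k' <;>
      simp [isObjLoop, h, isObjLoop_dead, isObjLoop_13, List.cons_prefix_cons, eq_comm]

theorem isObjLoop_11 (l : List Char) : isObjLoop 11 l = decide (['u','k','u'] <+: l) := by
  cases l with
  | nil => simp [isObjLoop]
  | cons c r =>
    by_cases h : c = 'u' <;>
      simp [isObjLoop, h, isObjLoop_dead, isObjLoop_12, List.cons_prefix_cons, eq_comm]

theorem isObjLoop_9 (l : List Char) : isObjLoop 9 l = decide (['s','i'] <+: l) := by
  cases l with
  | nil => simp [isObjLoop]
  | cons c r =>
    by_cases h : c = 's' <;>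
      simp [isObjLoop, h, isObjLoop_dead, isObjLoop_10, List.cons_prefix_cons, eq_comm]

theorem isObjLoop_8 (l : List Char) : isObjLoop 8 l = decide (['a','s','i'] <+: l) := by
  cases l with
  | nil => simp [isObjLoop]
  | cons c r =>
    by_cases h : c = 'a' <;>
      simp [isObjLoop, h, isObjLoop_dead, isObjLoop_9, List.cons_prefix_cons, eq_comm]

theorem isObjLoop_6 (l : List Char) : isObjLoop 6 l = decide (['l','m'] <+: l) := by
  cases l with
  | nil => simp [isObjLoop]
  | cons c r =>
    by_cases h : c = 'l' <;>
      simp [isObjLoop, h, isObjLoop_dead, isObjLoop_7, List.cons_prefix_cons, eq_comm]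

theorem isObjLoop_5 (l : List Char) : isObjLoop 5 l = decide (['i','l','m'] <+: l) := by
  cases l with
  | nil => simp [isObjLoop]
  | cons c r =>
    by_cases h : c = 'i' <;>
      simp [isObjLoop, h, isObjLoop_dead, isObjLoop_6, List.cons_prefix_cons, eq_comm]

theorem isObjLoop_3 (l : List Char) : isObjLoop 3 l = decide (['i','r'] <+: l) := by
  cases l with
  | nil => simp [isObjLoop]
  | cons c r =>
    by_cases h : c = 'i' <;>
      simp [isObjLoop, h, isObjLoop_dead, isObjLoop_4, List.cons_prefix_cons, eq_comm]

theorem isObjLoop_1 (l : List Char) : isObjLoop 1 l = decide (['u','e'] <+: l) := by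
  cases l with
  | nil => simp [isObjLoop]
  | cons c r =>
    by_cases h : c = 'u' <;>
      simp [isObjLoop, h, isObjLoop_dead, isObjLoop_2, List.cons_prefix_cons, eq_comm]

theorem startswith_decide (w p : List Char) :
    PySem.Chars.startswith w p = decide (p <+: w) := by
  cases hb : PySem.Chars.startswith w p
  · have h : ¬ p <+: w := fun hp => by
      simp [(PySem.Chars.startswith_iff _ _).mpr hp] at hb
    simp [h]
  · simp [(PySem.Chars.startswith_iff _ _).mp hb]

theorem isObjLoop_zero (l : List Char) :
    isObjLoop 0 l =
      (decide (['k','u','e'] <+: l) || decide (['a','i','r'] <+: l) ||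
       decide (['f','i','l','m'] <+: l) || decide (['n','a','s','i'] <+: l) ||
       decide (['b','u','k','u'] <+: l)) := by
  cases l with
  | nil => simp [isObjLoop]
  | cons c r =>
    by_cases hk : c = 'k' <;> by_cases ha : c = 'a' <;> by_cases hf : c = 'f' <;>
      by_cases hn : c = 'n' <;> by_cases hb : c = 'b' <;>
      simp_all [isObjLoop, isObjLoop_dead, isObjLoop_1, isObjLoop_3, isObjLoop_5,
        isObjLoop_8, isObjLoop_11, List.cons_prefix_cons, eq_comm]

-- ===== VERDICT (by name: the statement is the Claim_ definition above) =====
theorem is_object_spec : Claim_equal_is_object := by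
  intro word _
  unfold Spec_is_object is_object is_object_alt
  simp [List.any, startswith_decide, isObjLoop_zero, Bool.or_assoc]
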